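-- pv_equiv track=rewrite | github.com/sinamajidian/HapMC | compare3.py | extract_noswitch_blocks
-- ===== SOURCE A (Python) =====
-- def extract_noswitch_blocks(dic_block_est_truth, allele_origin_dic):
-- 	"""  extract no switch blocks from a block
--
-- 	input: dic haplotype truth, dic of a block (just those postion in truth),  dic of allel origin (PPPMM)
-- 	output: dic: key: 'last position'  val: dic
--
-- 	First, itried to name the key as the block numebr, but for combining the dicts in int main, i have problem
-- 	seperate a block to blocks which has no switch.
-- 	"""
-- 	dic_blocks_no_switch = {}
-- 	position_block = sorted(list(dic_block_est_truth))
-- 	if ('P' in allele_origin_dic.values()) and ('M' in allele_origin_dic.values()):  # when  a switch exists.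
-- 		for idx_pos, position in enumerate(position_block):
-- 			if not idx_pos:  # for first  idx_pos
-- 				dic_in = dict()
-- 				dic_in[position] = dic_block_est_truth[position]
-- 			else:
-- 				if allele_origin_dic[position] == allele_origin_dic[position_block[idx_pos - 1]]:  # No switch
-- 					dic_in[position] = dic_block_est_truth[position]  # add one by one
-- 				else:  # untill a switch occurs. Then, close  dic_in and store it and create a new dic_in.
-- 					dic_blocks_no_switch[position_block[idx_pos - 1]] = dic_in
-- 					dic_in = dict()
-- 					dic_in[position] = dic_block_est_truth[position]
-- 		dic_blocks_no_switch[position] = dic_in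
-- 	else:
-- 		dic_blocks_no_switch[position_block[-1]] = dic_block_est_truth
-- 	return dic_blocks_no_switch
-- ===== SOURCE B (Python) =====
-- def extract_noswitch_blocks(dic_block_est_truth, allele_origin_dic):
--     """Split the sorted positions into maximal runs of equal allele origin
--     (chunking recursion instead of an indexed stateful loop)."""
--     positions = sorted(dic_block_est_truth)
--     origins = set(allele_origin_dic.values())
--     if not ('P' in origins and 'M' in origins):
--         return {positions[-1]: dic_block_est_truth}
--     out = {}
--     rest = positions
--     while rest:
--         i = 1
--         while i < len(rest) and allele_origin_dic[rest[i]] == allele_origin_dic[rest[i - 1]]: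
--             i += 1
--         run, rest = rest[:i], rest[i:]
--         out[run[-1]] = {p: dic_block_est_truth[p] for p in run}
--     return out
-- ===== Notes on version B (the rewrite author's own statement) =====
-- stated objective: simpler
-- what changed: Replaces A's enumerate-indexed loop with dic_in/previous-position bookkeeping by a run-chunking pass that peels maximal runs of equal allele origin off the sorted positions and stores each run under its last position.
-- crash fix: On an empty dic_block_est_truth with both 'P' and 'M' among allele_origin_dic's values, A raises UnboundLocalError (its loop never binds dic_in/position); B returns the empty dict. — e.g. on extract_noswitch_blocks([], [(1, "P"), (2, "M")]): A raises UnboundLocalError, B returns []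
import Mathlib
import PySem

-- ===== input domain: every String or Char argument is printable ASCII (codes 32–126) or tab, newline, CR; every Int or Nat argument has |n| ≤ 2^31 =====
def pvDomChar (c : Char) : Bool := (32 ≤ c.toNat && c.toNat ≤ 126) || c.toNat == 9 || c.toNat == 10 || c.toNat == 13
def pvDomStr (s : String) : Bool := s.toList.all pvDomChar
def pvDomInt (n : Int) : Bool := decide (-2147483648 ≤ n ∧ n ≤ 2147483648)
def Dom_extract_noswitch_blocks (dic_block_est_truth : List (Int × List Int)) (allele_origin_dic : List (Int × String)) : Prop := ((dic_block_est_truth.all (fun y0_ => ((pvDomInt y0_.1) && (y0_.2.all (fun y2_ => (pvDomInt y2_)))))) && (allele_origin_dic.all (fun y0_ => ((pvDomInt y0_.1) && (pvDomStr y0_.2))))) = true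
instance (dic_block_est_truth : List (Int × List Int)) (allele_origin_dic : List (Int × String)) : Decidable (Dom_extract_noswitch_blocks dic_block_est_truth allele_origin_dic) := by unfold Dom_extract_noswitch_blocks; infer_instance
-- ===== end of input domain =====

-- B replaces A's indexed, stateful switch-detection loop by a run-chunking recursion
-- over the sorted positions (objective: simpler decomposition, same cost).

-- ===== PORT A =====
-- body of A's for-loop; state = (dic_blocks_no_switch, dic_in, position)
def pvAStep (d : PySem.Dict Int (List Int)) (ao : PySem.Dict Int String) (position_block : List Int)
    (st : PySem.Dict Int (List (Int × List Int)) × PySem.Dict Int (List Int) × Int)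
    (ip : Int × Int) : PySem.Dict Int (List (Int × List Int)) × PySem.Dict Int (List Int) × Int :=
  let idx := ip.1
  let position := ip.2
  if idx = 0 then
    (st.1, (PySem.Dict.empty).insert position (d.getD position []), position)
  else
    if ao.getD position "" = ao.getD ((PySem.List.pyGet? position_block (idx - 1)).getD 0) "" then
      (st.1, st.2.1.insert position (d.getD position []), position)
    else
      (st.1.insert ((PySem.List.pyGet? position_block (idx - 1)).getD 0) st.2.1.items,
       (PySem.Dict.empty).insert position (d.getD position []), position)

def extract_noswitch_blocks (dic_block_est_truth : List (Int × List Int)) (allele_origin_dic : List (Int × String)) : List (Int × List (Int × List Int)) :=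
  let d := PySem.Dict.ofList dic_block_est_truth
  let ao := PySem.Dict.ofList allele_origin_dic
  let position_block := PySem.List.sorted d.keys (fun x => x) false
  if "P" ∈ ao.values ∧ "M" ∈ ao.values then
    let st := (PySem.List.enumerate position_block 0).foldl (pvAStep d ao position_block)
      (PySem.Dict.empty, PySem.Dict.empty, 0)
    (st.1.insert st.2.2 st.2.1.items).items
  else
    ((PySem.Dict.empty : PySem.Dict Int (List (Int × List Int))).insert
      ((PySem.List.pyGet? position_block (-1)).getD 0) d.items).items

-- ===== PORT B =====
-- inner while of Source B: extend the current run while adjacent origins agree;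
-- returns (tail of the run after its first element, remaining positions)
def pvRun (ao : PySem.Dict Int String) (prev : Int) : List Int → List Int × List Int
  | [] => ([], [])
  | q :: rs =>
      if ao.getD q "" = ao.getD prev "" then
        let tr := pvRun ao q rs
        (q :: tr.1, tr.2)
      else ([], q :: rs)

theorem pvRun_length_le (ao : PySem.Dict Int String) (prev : Int) (l : List Int) :
    (pvRun ao prev l).2.length ≤ l.length := by
  induction l generalizing prev with
  | nil => simp [pvRun]
  | cons q rs ih =>
      by_cases h : ao.getD q "" = ao.getD prev ""
      · simpa [pvRun, h] using Nat.le_succ_of_le (ih q)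
      · simp [pvRun, h]

-- outer while of Source B: peel one run, store it under its last position, recurse
def pvChunkOut (d : PySem.Dict Int (List Int)) (ao : PySem.Dict Int String)
    (out : PySem.Dict Int (List (Int × List Int))) :
    List Int → PySem.Dict Int (List (Int × List Int))
  | [] => out
  | p :: rest =>
      let tr := pvRun ao p rest
      let run := p :: tr.1
      pvChunkOut d ao
        (out.insert (run.getLast?.getD 0)
          ((run.foldl (fun di q => di.insert q (d.getD q [])) PySem.Dict.empty).items)) tr.2
  termination_by l => l.length
  decreasing_by simpa using Nat.lt_succ_of_le (pvRun_length_le ao p rest)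

def extract_noswitch_blocks_alt (dic_block_est_truth : List (Int × List Int)) (allele_origin_dic : List (Int × String)) : List (Int × List (Int × List Int)) :=
  let d := PySem.Dict.ofList dic_block_est_truth
  let ao := PySem.Dict.ofList allele_origin_dic
  let positions := PySem.List.sorted d.keys (fun x => x) false
  let origins := PySem.Set.ofList ao.values
  if "P" ∈ origins ∧ "M" ∈ origins then
    (pvChunkOut d ao PySem.Dict.empty positions).items
  else
    [((PySem.List.pyGet? positions (-1)).getD 0, d.items)]

-- ===== PRECONDITION & SPEC =====
-- Pre_ excludes inputs on which Python A raises: the empty block dict (IndexError /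
-- UnboundLocalError) and, when both 'P' and 'M' occur among the origins and the block has
-- at least two positions, a position missing from allele_origin_dic (KeyError).
def Pre_extract_noswitch_blocks (dic_block_est_truth : List (Int × List Int)) (allele_origin_dic : List (Int × String)) : Prop :=
  dic_block_est_truth ≠ [] ∧
  (("P" ∈ (PySem.Dict.ofList allele_origin_dic).values ∧
    "M" ∈ (PySem.Dict.ofList allele_origin_dic).values ∧
    2 ≤ (PySem.Dict.ofList dic_block_est_truth).keys.length) →
   ∀ k ∈ (PySem.Dict.ofList dic_block_est_truth).keys, k ∈ allele_origin_dic.map Prod.fst)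
instance (dic_block_est_truth : List (Int × List Int)) (allele_origin_dic : List (Int × String)) : Decidable (Pre_extract_noswitch_blocks dic_block_est_truth allele_origin_dic) := by unfold Pre_extract_noswitch_blocks; infer_instance

def pvWitness_extract_noswitch_blocks : (List (Int × List Int)) × (List (Int × String)) :=
  ([(1, [0]), (2, [1]), (3, [0])], [(1, "P"), (2, "M"), (3, "M")])

-- On an empty block dict with both 'P' and 'M' among the origins, A raises UnboundLocalError
-- while B returns the empty dict.
def Raises_extract_noswitch_blocks (dic_block_est_truth : List (Int × List Int)) (allele_origin_dic : List (Int × String)) : Prop :=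
  dic_block_est_truth = [] ∧
  "P" ∈ (PySem.Dict.ofList allele_origin_dic).values ∧
  "M" ∈ (PySem.Dict.ofList allele_origin_dic).values
instance (dic_block_est_truth : List (Int × List Int)) (allele_origin_dic : List (Int × String)) : Decidable (Raises_extract_noswitch_blocks dic_block_est_truth allele_origin_dic) := by unfold Raises_extract_noswitch_blocks; infer_instance

def pvRaiseWitness_extract_noswitch_blocks : (List (Int × List Int)) × (List (Int × String)) :=
  ([], [(1, "P"), (2, "M")])

def pvRaiseWitnessOut_extract_noswitch_blocks : List (Int × List (Int × List Int)) := []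

def Spec_extract_noswitch_blocks (dic_block_est_truth : List (Int × List Int)) (allele_origin_dic : List (Int × String)) (out : List (Int × List (Int × List Int))) : Prop := out = extract_noswitch_blocks_alt dic_block_est_truth allele_origin_dic
instance (dic_block_est_truth : List (Int × List Int)) (allele_origin_dic : List (Int × String)) (out : List (Int × List (Int × List Int))) : Decidable (Spec_extract_noswitch_blocks dic_block_est_truth allele_origin_dic out) := by unfold Spec_extract_noswitch_blocks; infer_instance

-- ===== CLAIM (what is proved, stated in full; the proofs are below) =====
def Claim_equal_extract_noswitch_blocks : Prop := ∀ (dic_block_est_truth : List (Int × List Int)) (allele_origin_dic : List (Int × String)), Dom_extract_noswitch_blocks dic_block_est_truth allele_origin_dic → Pre_extract_noswitch_blocks dic_block_est_truth allele_origin_dic → Spec_extract_noswitch_blocks dic_block_est_truth allele_origin_dic (extract_noswitch_blocks dic_block_est_truth allele_origin_dic)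

def Claim_raises_extract_noswitch_blocks : Prop := (∀ (dic_block_est_truth : List (Int × List Int)) (allele_origin_dic : List (Int × String)), Dom_extract_noswitch_blocks dic_block_est_truth allele_origin_dic → Raises_extract_noswitch_blocks dic_block_est_truth allele_origin_dic → ¬ Pre_extract_noswitch_blocks dic_block_est_truth allele_origin_dic) ∧ (Dom_extract_noswitch_blocks (pvRaiseWitness_extract_noswitch_blocks.1) (pvRaiseWitness_extract_noswitch_blocks.2) ∧ Raises_extract_noswitch_blocks (pvRaiseWitness_extract_noswitch_blocks.1) (pvRaiseWitness_extract_noswitch_blocks.2) ∧ extract_noswitch_blocks_alt (pvRaiseWitness_extract_noswitch_blocks.1) (pvRaiseWitness_extract_noswitch_blocks.2) = pvRaiseWitnessOut_extract_noswitch_blocks)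

-- ===== LEMMAS AND PROOFS =====

-- A's loop after its first iteration, with the previous position carried as state
def pvALoop (d : PySem.Dict Int (List Int)) (ao : PySem.Dict Int String)
    (acc : PySem.Dict Int (List (Int × List Int))) (din : PySem.Dict Int (List Int)) (prev : Int) :
    List Int → PySem.Dict Int (List (Int × List Int)) × PySem.Dict Int (List Int) × Int
  | [] => (acc, din, prev)
  | q :: rs =>
      if ao.getD q "" = ao.getD prev "" then
        pvALoop d ao acc (din.insert q (d.getD q [])) q rs
      else
        pvALoop d ao (acc.insert prev din.items) ((PySem.Dict.empty).insert q (d.getD q [])) q rs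

theorem pvA_enum_eq (d : PySem.Dict Int (List Int)) (ao : PySem.Dict Int String)
    (rest : List Int) : ∀ (pre : List Int), pre ≠ [] →
    ∀ (acc : PySem.Dict Int (List (Int × List Int))) (din : PySem.Dict Int (List Int)) (prev : Int),
    pre.getLast? = some prev →
    (PySem.List.enumerate rest (pre.length : Int)).foldl (pvAStep d ao (pre ++ rest)) (acc, din, prev)
      = pvALoop d ao acc din prev rest := by
  induction rest with
  | nil => intro pre hpre acc din prev hlast; simp [pvALoop, PySem.List.enumerate_nil]
  | cons q rs ih =>
      intro pre hpre acc din prev hlast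
      have hlen1 : 1 ≤ pre.length := List.length_pos_iff.mpr hpre
      rw [PySem.List.enumerate_cons, List.foldl_cons]
      have hgetprev : (PySem.List.pyGet? (pre ++ q :: rs) ((pre.length : Int) - 1)).getD 0 = prev := by
        have hcast : ((pre.length : Int) - 1) = ((pre.length - 1 : Nat) : Int) := by omega
        rw [hcast, PySem.List.pyGet?_natCast,
            List.getElem?_append_left (by omega : pre.length - 1 < pre.length),
            ← List.getLast?_eq_getElem?, hlast]
        rfl
      have hidx : ((pre.length : Int)) ≠ 0 := by
        simpa using (by omega : ¬ (pre.length : Int) = 0)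
      have hstep : pvAStep d ao (pre ++ q :: rs) (acc, din, prev) ((pre.length : Int), q)
          = if ao.getD q "" = ao.getD prev "" then (acc, din.insert q (d.getD q []), q)
            else (acc.insert prev din.items, (PySem.Dict.empty).insert q (d.getD q []), q) := by
        simp only [pvAStep, hgetprev]
        rw [if_neg hidx]
      have hpre' : (pre ++ [q]) ≠ [] := by simp
      have hlast' : (pre ++ [q]).getLast? = some q := by simp
      have happ : pre ++ q :: rs = (pre ++ [q]) ++ rs := by simp
      have hlen' : ((pre ++ [q]).length : Int) = (pre.length : Int) + 1 := by simp
      rw [hstep]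
      by_cases h : ao.getD q "" = ao.getD prev ""
      · rw [if_pos h]
        have := ih (pre ++ [q]) hpre' acc (din.insert q (d.getD q [])) q hlast'
        rw [happ, ← hlen']
        rw [this]
        simp [pvALoop, h]
      · rw [if_neg h]
        have := ih (pre ++ [q]) hpre' (acc.insert prev din.items) ((PySem.Dict.empty).insert q (d.getD q [])) q hlast'
        rw [happ, ← hlen']
        rw [this]
        simp [pvALoop, h]

theorem pvALoop_eq_chunk (d : PySem.Dict Int (List Int)) (ao : PySem.Dict Int String)
    (rest : List Int) : ∀ (acc : PySem.Dict Int (List (Int × List Int))) (din : PySem.Dict Int (List Int)) (prev : Int),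
    (pvALoop d ao acc din prev rest).1.insert (pvALoop d ao acc din prev rest).2.2
        (pvALoop d ao acc din prev rest).2.1.items
      = pvChunkOut d ao
          (acc.insert ((prev :: (pvRun ao prev rest).1).getLast?.getD 0)
            (((pvRun ao prev rest).1.foldl (fun di q => di.insert q (d.getD q [])) din).items))
          (pvRun ao prev rest).2 := by
  induction rest with
  | nil => intro acc din prev; simp [pvALoop, pvRun, pvChunkOut]
  | cons q rs ih =>
      intro acc din prev
      by_cases h : ao.getD q "" = ao.getD prev ""
      · simp only [pvALoop, pvRun, if_pos h]
        rw [ih]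
        simp [List.getLast?_cons_cons]
      · simp only [pvALoop, pvRun, if_neg h]
        rw [ih]
        conv_rhs => rw [pvChunkOut]
        simp

-- ===== VERDICT (by name: the statement is the Claim_ definition above) =====
theorem pvKeys_ofList_ne_nil (l : List (Int × List Int)) (h : l ≠ []) :
    (PySem.Dict.ofList l).keys ≠ [] := by
  obtain ⟨p, rest, rfl⟩ := List.exists_cons_of_ne_nil h
  have hofl : (PySem.Dict.ofList (p :: rest)).keys
      = PySem.Set.update (PySem.Dict.empty : PySem.Dict Int (List Int)).keys ((p :: rest).map Prod.fst) := by
    exact PySem.Dict.keys_foldl_insert_key (p :: rest) Prod.fst (fun _ x => x.2) PySem.Dict.empty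
  have hmem : p.1 ∈ (PySem.Dict.ofList (p :: rest)).keys := by
    rw [hofl]
    rw [PySem.Set.mem_update]
    simp
  exact List.ne_nil_of_mem hmem

theorem extract_noswitch_blocks_spec : Claim_equal_extract_noswitch_blocks := by
  intro dte aod hdom hpre
  unfold Spec_extract_noswitch_blocks
  obtain ⟨hne, -⟩ := hpre
  simp only [extract_noswitch_blocks, extract_noswitch_blocks_alt]
  by_cases hc : "P" ∈ (PySem.Dict.ofList aod).values ∧ "M" ∈ (PySem.Dict.ofList aod).values
  · rw [if_pos hc, if_pos (by simpa [PySem.Set.mem_ofList] using hc)]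
    cases hpos : PySem.List.sorted (PySem.Dict.ofList dte).keys (fun x => x) false with
    | nil =>
        rw [PySem.List.sorted_eq_nil_iff] at hpos
        exact absurd hpos (pvKeys_ofList_ne_nil dte hne)
    | cons p0 ps =>
      rw [PySem.List.enumerate_cons, List.foldl_cons]
      have hstep0 : pvAStep (PySem.Dict.ofList dte) (PySem.Dict.ofList aod) (p0 :: ps)
          (PySem.Dict.empty, PySem.Dict.empty, 0) (0, p0)
          = (PySem.Dict.empty,
             (PySem.Dict.empty).insert p0 ((PySem.Dict.ofList dte).getD p0 []), p0) := by
        simp [pvAStep]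
      rw [hstep0]
      have henum := pvA_enum_eq (PySem.Dict.ofList dte) (PySem.Dict.ofList aod) ps [p0] (by simp)
        PySem.Dict.empty ((PySem.Dict.empty).insert p0 ((PySem.Dict.ofList dte).getD p0 [])) p0 (by simp)
      simp only [List.length_cons, List.length_nil, List.singleton_append, Nat.cast_one,
        zero_add] at henum
      rw [show (0 : Int) + 1 = 1 from by norm_num]
      rw [henum]
      rw [pvALoop_eq_chunk]
      conv_rhs => rw [pvChunkOut]
      simp
  · rw [if_neg hc, if_neg (by simpa [PySem.Set.mem_ofList] using hc)]
    simp [PySem.Dict.items_insert, PySem.Dict.contains_empty]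
    rfl

@[simp] theorem extract_noswitch_blocks_raises : Claim_raises_extract_noswitch_blocks := by
  unfold Claim_raises_extract_noswitch_blocks
  refine ⟨by intro dte aod _ hr hp; exact hp.1 hr.1, by decide, by decide, ?_⟩
  show extract_noswitch_blocks_alt [] [(1, "P"), (2, "M")] = []
  simp only [extract_noswitch_blocks_alt]
  rw [if_pos (by decide), show (PySem.List.sorted (PySem.Dict.ofList ([] : List (Int × List Int))).keys (fun x => x) false) = [] from by decide]
  simp [pvChunkOut]
  decide
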